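-- pv_equiv track=rewrite | github.com/pranith563/voxbank | orchestrator/src/guards/json_clean.py | _repair_replace_constants
-- ===== SOURCE A (Python) =====
-- from typing import Any, Dict, List, Optional, Tuple, Union, Iterable, Callable
--
-- def _repair_replace_constants(s: str, replace_nans_infinities: bool = True) -> Tuple[str, int, Dict[str, int]]:
--     """
--     Replace Python/JS-like constants outside strings:
--       True/False/None -> true/false/null
--       NaN, Infinity, -Infinity -> null (if replace_nans_infinities)
--     """
--     out: List[str] = []
--     in_dq = False
--     esc = False
--     i = 0
--     n = len(s)
--     changes = 0
--     counts = {"true_false_none": 0, "nans_infinities": 0}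
--     def is_word_char(c: str) -> bool:
--         return c.isalnum() or c in {'_', '-'}
--     while i < n:
--         ch = s[i]
--         if in_dq:
--             if esc:
--                 out.append(ch); esc = False; i += 1; continue
--             if ch == '\\':
--                 out.append(ch); esc = True; i += 1; continue
--             if ch == '"':
--                 out.append(ch); in_dq = False; i += 1; continue
--             out.append(ch); i += 1; continue
--         else:
--             if ch == '"':
--                 in_dq = True
--                 out.append(ch); i += 1; continue
--             # tokenization
--             if ch.isalpha() or ch == '-':
--                 j = i
--                 while j < n and is_word_char(s[j]):
--                     j += 1
--                 token = s[i:j]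
--                 lower = token.lower()
--                 replaced = None
--                 if token in ("True", "False", "None"):
--                     mapping = {"True": "true", "False": "false", "None": "null"}
--                     replaced = mapping[token]
--                     counts["true_false_none"] += 1
--                 elif replace_nans_infinities and token in ("NaN", "Infinity"):
--                     replaced = "null"
--                     counts["nans_infinities"] += 1
--                 elif replace_nans_infinities and token == "-Infinity":
--                     replaced = "null"
--                     counts["nans_infinities"] += 1
--                 if replaced is not None:
--                     out.append(replaced)
--                     changes += 1
--                     i = j
--                     continue
--                 out.append(token)
--                 i = j
--                 continue
--             out.append(ch); i += 1; continue
--     return ''.join(out), changes, counts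
-- ===== SOURCE B (Python) =====
-- # B: tokenize the input once into segments (string literal / word / single char),
-- # then map the segments in a separate pure pass -- instead of A's inline
-- # char-by-char state machine with in_dq/esc flags.
--
-- _MAP = {"True": "true", "False": "false", "None": "null"}
--
--
-- def _string_literal_end(s, i):
--     """s[i] == '"': return index just past the literal (past closing quote,
--     or end of string if unterminated), skipping backslash escapes."""
--     j = i + 1
--     n = len(s)
--     while j < n:
--         c = s[j]
--         if c == '\\':
--             j += 2
--         elif c == '"':
--             return j + 1
--         else:
--             j += 1
--     return n
--
--
-- def _segments(s):
--     """Yield ('str', text) | ('word', text) | ('chr', text) segments covering s."""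
--     i = 0
--     n = len(s)
--     while i < n:
--         c = s[i]
--         if c == '"':
--             j = _string_literal_end(s, i)
--             yield ('str', s[i:j])
--         elif c.isalpha() or c == '-':
--             j = i + 1
--             while j < n and (s[j].isalnum() or s[j] in ('_', '-')):
--                 j += 1
--             yield ('word', s[i:j])
--         else:
--             j = i + 1
--             yield ('chr', c)
--         i = j
--
--
-- def _repair_replace_constants(s, replace_nans_infinities=True):
--     parts = []
--     changes = 0
--     tfn = 0
--     nni = 0
--     for kind, text in _segments(s):
--         if kind == 'word':
--             rep = _MAP.get(text)
--             if rep is not None: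
--                 parts.append(rep)
--                 changes += 1
--                 tfn += 1
--                 continue
--             if replace_nans_infinities and text in ("NaN", "Infinity", "-Infinity"):
--                 parts.append("null")
--                 changes += 1
--                 nni += 1
--                 continue
--         parts.append(text)
--     return ''.join(parts), changes, {"true_false_none": tfn, "nans_infinities": nni}
-- ===== Notes on version B (the rewrite author's own statement) =====
-- stated objective: alternative
-- what changed: A's single-pass character state machine with in_dq/esc flags and inline counting is replaced by a two-phase design: a tokenizer that splits the input once into whole segments (full double-quoted string literals, word tokens, single characters) followed by a separate pure mapping pass over the segments.
import Mathlib
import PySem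

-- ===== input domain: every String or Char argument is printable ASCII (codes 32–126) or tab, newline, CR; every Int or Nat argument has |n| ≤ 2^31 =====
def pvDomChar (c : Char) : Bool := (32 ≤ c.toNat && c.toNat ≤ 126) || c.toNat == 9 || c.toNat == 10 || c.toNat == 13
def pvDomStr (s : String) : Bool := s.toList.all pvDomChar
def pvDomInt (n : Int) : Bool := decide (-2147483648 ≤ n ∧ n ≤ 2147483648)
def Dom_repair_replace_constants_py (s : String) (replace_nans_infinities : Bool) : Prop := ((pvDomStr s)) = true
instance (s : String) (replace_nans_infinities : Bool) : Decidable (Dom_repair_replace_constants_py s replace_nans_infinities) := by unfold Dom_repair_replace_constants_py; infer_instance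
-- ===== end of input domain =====

-- B tokenizes the input into segments (string literal / word / single char) in one pass
-- and maps the segments in a second pure pass, instead of A's inline in_dq/esc state
-- machine (objective: alternative decomposition); return values proved equal to A's.

-- ===== PORT A =====
-- is_word_char helper of A (exact on the ASCII domain)
def pvIsWordChar (c : Char) : Bool := PySem.Chars.isalnum c || c == '_' || c == '-'

-- cited by pvA_go's decreasing_by: a word start char is a word char
theorem pvIsWordChar_of_start (c : Char) (h : (PySem.Chars.isalpha c || c == '-') = true) :
    pvIsWordChar c = true := by
  simp [pvIsWordChar, PySem.Chars.isalnum] at *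
  rcases h with h | h
  · exact Or.inl (Or.inl (Or.inl h))
  · exact Or.inr h

-- cited by pvA_go's decreasing_by
theorem pv_dropWhile_head_le (c : Char) (rest : List Char) (h : pvIsWordChar c = true) :
    (List.dropWhile pvIsWordChar (c :: rest)).length ≤ rest.length := by
  rw [List.dropWhile_cons_of_pos h]
  exact List.length_dropWhile_le _ _

-- the while loop of A: state = (remaining input, in_dq, esc, out, changes,
-- counts["true_false_none"], counts["nans_infinities"]); out is kept as the
-- flattened char list ("".join of A's out) and the two fixed-key counters of A's
-- counts dict as two Ints, reassembled into the dict at the end.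
def pvA_go (rns : Bool) : List Char → Bool → Bool → List Char → Int → Int → Int →
    (List Char × Int × Int × Int)
  | [], _, _, out, ch, t, ni => (out, ch, t, ni)
  | c :: rest, in_dq, esc, out, ch, t, ni =>
    if in_dq then
      if esc then pvA_go rns rest in_dq false (out ++ [c]) ch t ni
      else if c == '\\' then pvA_go rns rest in_dq true (out ++ [c]) ch t ni
      else if c == '"' then pvA_go rns rest false esc (out ++ [c]) ch t ni
      else pvA_go rns rest in_dq esc (out ++ [c]) ch t ni
    else
      if c == '"' then pvA_go rns rest true esc (out ++ [c]) ch t ni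
      else if (PySem.Chars.isalpha c || c == '-') then
        -- inner while loop scanning the word: token = s[i:j]
        let token := (c :: rest).takeWhile pvIsWordChar
        let rest' := (c :: rest).dropWhile pvIsWordChar
        if token = "True".toList then pvA_go rns rest' in_dq esc (out ++ "true".toList) (ch + 1) (t + 1) ni
        else if token = "False".toList then pvA_go rns rest' in_dq esc (out ++ "false".toList) (ch + 1) (t + 1) ni
        else if token = "None".toList then pvA_go rns rest' in_dq esc (out ++ "null".toList) (ch + 1) (t + 1) ni
        else if rns && (token = "NaN".toList || token = "Infinity".toList) then
          pvA_go rns rest' in_dq esc (out ++ "null".toList) (ch + 1) t (ni + 1)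
        else if rns && token = "-Infinity".toList then
          pvA_go rns rest' in_dq esc (out ++ "null".toList) (ch + 1) t (ni + 1)
        else pvA_go rns rest' in_dq esc (out ++ token) ch t ni
      else pvA_go rns rest in_dq esc (out ++ [c]) ch t ni
  termination_by cs => cs.length
  decreasing_by
    all_goals simp only [List.length_cons, Nat.lt_succ_iff]
    all_goals first
      | exact Nat.le_refl _
      | exact pv_dropWhile_head_le _ _ (pvIsWordChar_of_start _ (by assumption))

def repair_replace_constants_py (s : String) (replace_nans_infinities : Bool) :
    String × Int × (List (String × Int)) :=
  let r := pvA_go replace_nans_infinities s.toList false false [] 0 0 0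
  (String.ofList r.1, r.2.1, [("true_false_none", r.2.2.1), ("nans_infinities", r.2.2.2)])

-- ===== PORT B =====
-- _string_literal_end of Source B, phrased on the chars after the opening quote:
-- returns (literal text after the opening quote, remaining chars); the
-- backslash case consumes two chars (j += 2), possibly just one at the very end.
def pvStrBody : List Char → (List Char × List Char)
  | [] => ([], [])
  | [c] =>
    -- one char left: whether it is a backslash (j += 2 overshoots), a closing
    -- quote, or an ordinary char, the literal ends here with this char in it
    if c == '\\' then ([c], [])
    else if c == '"' then ([c], [])
    else ([c], [])
  | c :: d :: rest' =>
    if c == '\\' then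
      let p := pvStrBody rest'
      (c :: d :: p.1, p.2)
    else if c == '"' then ([c], d :: rest')
    else
      let p := pvStrBody (d :: rest')
      (c :: p.1, p.2)

-- cited by pvSegments' decreasing_by
theorem pvStrBody_rest_le : ∀ (l : List Char), (pvStrBody l).2.length ≤ l.length
  | [] => by simp [pvStrBody]
  | [c] => by simp [pvStrBody]
  | c :: d :: rest' => by
    have h1 := pvStrBody_rest_le rest'
    have h2 := pvStrBody_rest_le (d :: rest')
    simp only [List.length_cons] at h2 ⊢
    by_cases hb : c == '\\'
    · simp only [pvStrBody, hb, if_true]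
      omega
    · by_cases hq : c == '"'
      · simp [pvStrBody, hb, hq]
      · simp [pvStrBody, hb, hq]
        omega

-- segment type of Source B's _segments generator
inductive PvSeg
  | str : List Char → PvSeg
  | word : List Char → PvSeg
  | chr : Char → PvSeg
deriving DecidableEq, Repr

-- the _segments generator of Source B (word scan starts after the first char, j = i + 1)
def pvSegments : List Char → List PvSeg
  | [] => []
  | c :: rest =>
    if c == '"' then
      let p := pvStrBody rest
      PvSeg.str (c :: p.1) :: pvSegments p.2
    else if (PySem.Chars.isalpha c || c == '-') then
      PvSeg.word (c :: rest.takeWhile pvIsWordChar) ::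
        pvSegments (rest.dropWhile pvIsWordChar)
    else PvSeg.chr c :: pvSegments rest
  termination_by cs => cs.length
  decreasing_by
    all_goals simp only [List.length_cons]
    all_goals first
      | exact Nat.lt_succ_self _
      | exact Nat.lt_succ_of_le (pvStrBody_rest_le _)
      | exact Nat.lt_succ_of_le (List.length_dropWhile_le _ _)

-- the _MAP dict of Source B
def pvMapB : PySem.Dict (List Char) (List Char) :=
  ⟨[("True".toList, "true".toList), ("False".toList, "false".toList),
    ("None".toList, "null".toList)]⟩

-- loop body of Source B's main for-loop; state = (parts joined, changes, tfn, nni)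
def pvStepB (rns : Bool) (acc : List Char × Int × Int × Int) (seg : PvSeg) :
    List Char × Int × Int × Int :=
  match seg with
  | .str tx => (acc.1 ++ tx, acc.2.1, acc.2.2.1, acc.2.2.2)
  | .chr c => (acc.1 ++ [c], acc.2.1, acc.2.2.1, acc.2.2.2)
  | .word tx =>
    match PySem.Dict.get? pvMapB tx with
    | some rep => (acc.1 ++ rep, acc.2.1 + 1, acc.2.2.1 + 1, acc.2.2.2)
    | none =>
      if rns && (tx = "NaN".toList || tx = "Infinity".toList || tx = "-Infinity".toList) then
        (acc.1 ++ "null".toList, acc.2.1 + 1, acc.2.2.1, acc.2.2.2 + 1)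
      else (acc.1 ++ tx, acc.2.1, acc.2.2.1, acc.2.2.2)

def repair_replace_constants_py_alt (s : String) (replace_nans_infinities : Bool) :
    String × Int × (List (String × Int)) :=
  let r := (pvSegments s.toList).foldl (pvStepB replace_nans_infinities) ([], 0, 0, 0)
  (String.ofList r.1, r.2.1, [("true_false_none", r.2.2.1), ("nans_infinities", r.2.2.2)])

-- ===== PRECONDITION & SPEC =====
def Spec_repair_replace_constants_py (s : String) (replace_nans_infinities : Bool) (out : String × Int × (List (String × Int))) : Prop := out = repair_replace_constants_py_alt s replace_nans_infinities
instance (s : String) (replace_nans_infinities : Bool) (out : String × Int × (List (String × Int))) : Decidable (Spec_repair_replace_constants_py s replace_nans_infinities out) := by unfold Spec_repair_replace_constants_py; infer_instance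

-- ===== CLAIM (what is proved, stated in full; the proofs are below) =====
def Claim_equal_repair_replace_constants_py : Prop := ∀ (s : String) (replace_nans_infinities : Bool), Dom_repair_replace_constants_py s replace_nans_infinities → Spec_repair_replace_constants_py s replace_nans_infinities (repair_replace_constants_py s replace_nans_infinities)

-- ===== LEMMAS AND PROOFS =====

-- A's in-string loop consumes exactly one string-literal body of B
theorem pvA_string (rns : Bool) : ∀ (l acc : List Char) (c t n : Int),
    pvA_go rns l true false acc c t n =
      pvA_go rns (pvStrBody l).2 false false (acc ++ (pvStrBody l).1) c t n
  | [], acc, c, t, n => by simp [pvStrBody, pvA_go]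
  | [ch], acc, c, t, n => by
    simp [pvStrBody, pvA_go]
  | ch :: d :: rest', acc, c, t, n => by
    by_cases hb : ch == '\\'
    · have h := pvA_string rns rest' (acc ++ [ch, d]) c t n
      simp [pvStrBody, pvA_go, hb]
      simpa [List.append_assoc] using h
    · by_cases hq : ch == '"'
      · simp [pvStrBody, pvA_go, hb, hq]
      · have h := pvA_string rns (d :: rest') (acc ++ [ch]) c t n
        have step : pvA_go rns (ch :: d :: rest') true false acc c t n
            = pvA_go rns (d :: rest') true false (acc ++ [ch]) c t n := by
          simp [pvA_go, hb, hq]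
        rw [step, h]
        simp [pvStrBody, hb, hq, List.append_assoc]
  termination_by l => l.length
  decreasing_by all_goals simp only [List.length_cons]; omega

-- A's outer loop = fold of B's step over B's segments
theorem pvA_segments (rns : Bool) : ∀ (cs acc : List Char) (c t n : Int),
    pvA_go rns cs false false acc c t n =
      (pvSegments cs).foldl (pvStepB rns) (acc, c, t, n)
  | [], acc, c, t, n => by simp [pvSegments, pvA_go]
  | ch :: rest, acc, c, t, n => by
    by_cases hq : ch == '"'
    · have hs := pvA_string rns rest (acc ++ [ch]) c t n
      have ih := pvA_segments rns (pvStrBody rest).2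
        (acc ++ [ch] ++ (pvStrBody rest).1) c t n
      simp [pvSegments, pvA_go, hq, pvStepB]
      rw [hs, ih]
      simp [List.append_assoc]
    · by_cases hw : (PySem.Chars.isalpha ch || ch == '-') = true
      · have hwc : pvIsWordChar ch = true := pvIsWordChar_of_start ch hw
        have htk : (ch :: rest).takeWhile pvIsWordChar = ch :: rest.takeWhile pvIsWordChar :=
          List.takeWhile_cons_of_pos hwc
        have hdr : (ch :: rest).dropWhile pvIsWordChar = rest.dropWhile pvIsWordChar :=
          List.dropWhile_cons_of_pos hwc
        have ih := fun (acc : List Char) (c t n : Int) =>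
          pvA_segments rns (rest.dropWhile pvIsWordChar) acc c t n
        by_cases h1 : ch :: rest.takeWhile pvIsWordChar = "True".toList
        · obtain ⟨rfl, htw⟩ : ch = 'T' ∧ rest.takeWhile pvIsWordChar = ['r','u','e'] := by
            simpa using h1
          have ha : PySem.Chars.isalpha 'T' = true := by decide
          simp [pvSegments, pvA_go, ha, htk, hdr, htw, pvStepB, pvMapB,
            PySem.Dict.get?, ih]
        · by_cases h2 : ch :: rest.takeWhile pvIsWordChar = "False".toList
          · obtain ⟨rfl, htw⟩ : ch = 'F' ∧ rest.takeWhile pvIsWordChar = ['a','l','s','e'] := by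
              simpa using h2
            have ha : PySem.Chars.isalpha 'F' = true := by decide
            simp [pvSegments, pvA_go, ha, htk, hdr, htw, pvStepB, pvMapB,
              PySem.Dict.get?, ih]
          · by_cases h3 : ch :: rest.takeWhile pvIsWordChar = "None".toList
            · obtain ⟨rfl, htw⟩ : ch = 'N' ∧ rest.takeWhile pvIsWordChar = ['o','n','e'] := by
                simpa using h3
              have ha : PySem.Chars.isalpha 'N' = true := by decide
              simp [pvSegments, pvA_go, ha, htk, hdr, htw, pvStepB, pvMapB,
                PySem.Dict.get?, ih]
            · by_cases h4 : ch :: rest.takeWhile pvIsWordChar = "NaN".toList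
              · obtain ⟨rfl, htw⟩ : ch = 'N' ∧ rest.takeWhile pvIsWordChar = ['a','N'] := by
                  simpa using h4
                have ha : PySem.Chars.isalpha 'N' = true := by decide
                cases rns <;>
                  simp [pvSegments, pvA_go, ha, htk, hdr, htw, pvStepB, pvMapB,
                    PySem.Dict.get?, ih]
              · by_cases h5 : ch :: rest.takeWhile pvIsWordChar = "Infinity".toList
                · obtain ⟨rfl, htw⟩ : ch = 'I' ∧ rest.takeWhile pvIsWordChar = ['n','f','i','n','i','t','y'] := by
                    simpa using h5
                  have ha : PySem.Chars.isalpha 'I' = true := by decide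
                  cases rns <;>
                    simp [pvSegments, pvA_go, ha, htk, hdr, htw, pvStepB, pvMapB,
                      PySem.Dict.get?, ih]
                · by_cases h6 : ch :: rest.takeWhile pvIsWordChar = "-Infinity".toList
                  · obtain ⟨rfl, htw⟩ : ch = '-' ∧ rest.takeWhile pvIsWordChar = ['I','n','f','i','n','i','t','y'] := by
                      simpa using h6
                    cases rns <;>
                      simp [pvSegments, pvA_go, htk, hdr, htw, pvStepB, pvMapB,
                        PySem.Dict.get?, ih]
                  · have hget : PySem.Dict.get? pvMapB (ch :: rest.takeWhile pvIsWordChar) = none := by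
                      simp [PySem.Dict.get?, pvMapB, List.find?_eq_none]
                      refine ⟨?_, ?_, ?_⟩ <;>
                        (intro hc ht
                         subst hc
                         first
                           | exact h1 (by rw [← ht]; decide)
                           | exact h2 (by rw [← ht]; decide)
                           | exact h3 (by rw [← ht]; decide))
                    have hdT : ¬(ch = 'T' ∧ List.takeWhile pvIsWordChar rest = ['r','u','e']) :=
                      fun h => h1 (by rw [h.1, h.2]; decide)
                    have hdF : ¬(ch = 'F' ∧ List.takeWhile pvIsWordChar rest = ['a','l','s','e']) :=
                      fun h => h2 (by rw [h.1, h.2]; decide)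
                    have hdN : ¬(ch = 'N' ∧ List.takeWhile pvIsWordChar rest = ['o','n','e']) :=
                      fun h => h3 (by rw [h.1, h.2]; decide)
                    have hd1 : ¬(ch = 'N' ∧ List.takeWhile pvIsWordChar rest = ['a','N']) :=
                      fun h => h4 (by rw [h.1, h.2]; decide)
                    have hd2 : ¬(ch = 'I' ∧ List.takeWhile pvIsWordChar rest = ['n','f','i','n','i','t','y']) :=
                      fun h => h5 (by rw [h.1, h.2]; decide)
                    have hd3 : ¬(ch = '-' ∧ List.takeWhile pvIsWordChar rest = ['I','n','f','i','n','i','t','y']) :=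
                      fun h => h6 (by rw [h.1, h.2]; decide)
                    cases rns <;>
                      simp [pvSegments, pvA_go, hq, hw, htk, hdr, pvStepB, hget,
                        hdT, hdF, hdN, hd1, hd2, hd3, ih]
      · have ih := pvA_segments rns rest (acc ++ [ch]) c t n
        simp [pvSegments, pvA_go, hq, hw, pvStepB]
        simpa using ih
  termination_by cs => cs.length
  decreasing_by
    all_goals simp only [List.length_cons]
    all_goals first
      | exact Nat.lt_succ_self _
      | exact Nat.lt_succ_of_le (pvStrBody_rest_le _)
      | exact Nat.lt_succ_of_le (List.length_dropWhile_le _ _)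

-- ===== VERDICT (by name: the statement is the Claim_ definition above) =====
theorem repair_replace_constants_py_spec : Claim_equal_repair_replace_constants_py := by
  intro s rns _
  unfold Spec_repair_replace_constants_py
  simp [repair_replace_constants_py, repair_replace_constants_py_alt, pvA_segments]
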